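-- pv_equiv track=rewrite | github.com/TheMaSTeR007/tutorials | python/bfs.py | get_StartAndGoal
-- ===== SOURCE A (Python) =====
-- def get_StartAndGoal(map):
--     start = "R"
--     goal = "D"
--     start_loc = None
--     goal_loc = None
--
--     for indx, row in enumerate(map):
--         if start_loc == None and start in row:
--             start_loc = (row.find(start), indx)
--         if goal_loc == None and goal in row:
--             goal_loc = (row.find(goal), indx)
--         if start_loc != None and goal_loc != None:
--             break
--
--     return start_loc, goal_loc
-- ===== SOURCE B (Python) =====
-- def get_StartAndGoal(map):
--     def find(ch):
--         for indx, row in enumerate(map):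
--             col = row.find(ch)
--             if col != -1:
--                 return (col, indx)
--         return None
--     return find("R"), find("D")
-- ===== Notes on version B (the rewrite author's own statement) =====
-- stated objective: simpler
-- what changed: Replaces the single interleaved scan with dual found-state and early break by two independent first-occurrence searches via a small helper find(ch).
import Mathlib
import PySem

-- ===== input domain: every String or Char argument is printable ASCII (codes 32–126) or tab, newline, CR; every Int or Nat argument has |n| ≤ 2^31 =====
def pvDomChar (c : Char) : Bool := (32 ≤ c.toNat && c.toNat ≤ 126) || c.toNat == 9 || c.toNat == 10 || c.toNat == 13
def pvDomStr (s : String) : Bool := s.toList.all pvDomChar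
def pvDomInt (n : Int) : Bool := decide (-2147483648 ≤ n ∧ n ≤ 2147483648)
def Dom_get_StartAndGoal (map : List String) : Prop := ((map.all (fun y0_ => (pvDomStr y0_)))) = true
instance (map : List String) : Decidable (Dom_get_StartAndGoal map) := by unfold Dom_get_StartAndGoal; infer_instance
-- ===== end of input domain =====

-- B replaces A's single interleaved scan (two found-states, early break) by two
-- independent first-occurrence searches through one small helper: simpler decomposition.

-- ===== PORT A =====
-- A's loop: state (start_loc, goal_loc), update each when still None and the char occurs,
-- break as soon as both are set.
def pvGoA (rows : List String) (indx : Int)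
    (sl gl : Option (Int × Int)) : (Option (Int × Int)) × (Option (Int × Int)) :=
  match rows with
  | [] => (sl, gl)
  | row :: rest =>
    let sl' := if sl = none ∧ PySem.Str.isIn "R" row = true
               then some (PySem.Str.find row "R", indx) else sl
    let gl' := if gl = none ∧ PySem.Str.isIn "D" row = true
               then some (PySem.Str.find row "D", indx) else gl
    if sl' ≠ none ∧ gl' ≠ none then (sl', gl')
    else pvGoA rest (indx + 1) sl' gl'

def get_StartAndGoal (map : List String) : (Option (Int × Int)) × (Option (Int × Int)) :=
  pvGoA map 0 none none

-- ===== PORT B =====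
-- B's helper find(ch): scan rows, return (row.find(ch), indx) at the first row containing ch.
def pvFindB (ch : String) (rows : List String) (indx : Int) : Option (Int × Int) :=
  match rows with
  | [] => none
  | row :: rest =>
    let col := PySem.Str.find row ch
    if col ≠ -1 then some (col, indx) else pvFindB ch rest (indx + 1)

def get_StartAndGoal_alt (map : List String) : (Option (Int × Int)) × (Option (Int × Int)) :=
  (pvFindB "R" map 0, pvFindB "D" map 0)

-- ===== PRECONDITION & SPEC =====
def Spec_get_StartAndGoal (map : List String) (out : (Option (Int × Int)) × (Option (Int × Int))) : Prop := out = get_StartAndGoal_alt map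
instance (map : List String) (out : (Option (Int × Int)) × (Option (Int × Int))) : Decidable (Spec_get_StartAndGoal map out) := by unfold Spec_get_StartAndGoal; infer_instance

-- ===== CLAIM (what is proved, stated in full; the proofs are below) =====
def Claim_equal_get_StartAndGoal : Prop := ∀ (map : List String), Dom_get_StartAndGoal map → Spec_get_StartAndGoal map (get_StartAndGoal map)

-- ===== LEMMAS AND PROOFS =====

-- Membership in A ('ch in row') and B's '.find(ch) != -1' agree.
theorem pv_isIn_eq_decide (sub cs : List Char) :
    PySem.Chars.isIn sub cs = decide (PySem.Chars.find cs sub ≠ -1) := by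
  by_cases h : PySem.Chars.find cs sub = -1
  · simp [h, PySem.Chars.isIn_eq_false_iff, (PySem.Chars.find_eq_neg_one_iff cs sub).mp h]
  · simp [h, PySem.Chars.isIn_iff_infix, (PySem.Chars.find_ne_neg_one_iff cs sub).mp h]

-- The loop invariant: A's interleaved loop with carried states sl, gl equals the
-- already-found values overridden only when still none by B's independent searches.
theorem pvGoA_eq (rows : List String) (indx : Int) (sl gl : Option (Int × Int)) :
    pvGoA rows indx sl gl
      = (sl.or (pvFindB "R" rows indx), gl.or (pvFindB "D" rows indx)) := by
  induction rows generalizing indx sl gl with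
  | nil => simp [pvGoA, pvFindB]
  | cons row rest ih =>
    simp only [pvGoA, pvFindB]
    by_cases hR : PySem.Chars.find row.toList ['R'] = -1 <;>
    by_cases hD : PySem.Chars.find row.toList ['D'] = -1 <;>
    cases sl <;> cases gl <;>
      simp [ih, pv_isIn_eq_decide, hR, hD, Option.or]

-- ===== VERDICT (by name: the statement is the Claim_ definition above) =====
theorem get_StartAndGoal_spec : Claim_equal_get_StartAndGoal := by
  intro map _
  unfold Spec_get_StartAndGoal get_StartAndGoal get_StartAndGoal_alt
  simp [pvGoA_eq, Option.or]
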